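-- pv_equiv track=rewrite | github.com/martinruefenacht/fennel | fennel/generators/allreduce.py | _aggregate_factors
-- ===== SOURCE A (Python) =====
-- from typing import Any, Optional, Tuple, Iterable, Collection
--
-- def _aggregate_factors(factors: Collection[int],
--                        threshold: int
--                        ) -> Collection[int]:
--     """
--     """
--
--     if len(factors) <= 1:
--         return factors
--
--     factors = sorted(factors)
--
--     prod = factors[0] * factors[1]
--     if prod > threshold:
--         return factors
--
--     return _aggregate_factors([prod] + factors[2:], threshold)
-- ===== SOURCE B (Python) =====
-- def _aggregate_factors(factors, threshold):
--     # Sort once, then repeatedly merge the two smallest, re-inserting each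
--     # product into the sorted remainder by ordered insertion.
--     if len(factors) <= 1:
--         return factors
--     s = sorted(factors)
--     while len(s) >= 2:
--         p = s[0] * s[1]
--         if p > threshold:
--             break
--         rest = s[2:]
--         i = 0
--         while i < len(rest) and rest[i] < p:
--             i += 1
--         s = rest[:i] + [p] + rest[i:]
--     return s
-- ===== Notes on version B (the rewrite author's own statement) =====
-- stated objective: alternative
-- what changed: B sorts once and re-inserts each merged product into the sorted remainder by ordered insertion, instead of A's recursion that re-sorts the whole list on every merge.
import Mathlib
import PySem

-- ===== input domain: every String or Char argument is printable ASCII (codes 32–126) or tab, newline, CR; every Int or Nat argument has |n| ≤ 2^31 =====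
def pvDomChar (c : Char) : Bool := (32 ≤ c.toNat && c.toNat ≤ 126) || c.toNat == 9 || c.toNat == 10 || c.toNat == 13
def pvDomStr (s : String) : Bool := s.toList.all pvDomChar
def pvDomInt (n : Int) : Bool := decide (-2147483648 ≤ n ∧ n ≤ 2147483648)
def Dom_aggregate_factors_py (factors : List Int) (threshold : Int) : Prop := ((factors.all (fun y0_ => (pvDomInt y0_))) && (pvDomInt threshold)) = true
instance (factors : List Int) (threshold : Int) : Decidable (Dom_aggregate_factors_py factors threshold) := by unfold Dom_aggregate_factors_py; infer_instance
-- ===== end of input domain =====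

-- B sorts once and re-inserts each merged product by ordered insertion, instead of
-- re-sorting the whole list on every merge as A does (objective: alternative decomposition).
-- ===== PORT A =====
-- A: if len(factors) <= 1 return factors; sort; if factors[0]*factors[1] > threshold
-- return the sorted list; else recurse on [prod] + factors[2:].
def aggregate_factors_py (factors : List Int) (threshold : Int) : List Int :=
  if factors.length <= 1 then factors
  else
    match hs : PySem.List.sorted factors (fun x => x) false with
    | a :: b :: rest =>
      let prod := a * b
      if prod > threshold then a :: b :: rest
      else aggregate_factors_py (prod :: rest) threshold
    | s => s
termination_by factors.length
decreasing_by
  have h := PySem.List.length_sorted factors (fun x : Int => x) false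
  rw [hs] at h; simp at h ⊢; omega

-- ===== PORT B =====
-- inner while loop of Source B: insert p before the first element not < p
def pvInsertSorted (p : Int) : List Int → List Int
  | [] => [p]
  | x :: xs => if x < p then x :: pvInsertSorted p xs else p :: x :: xs

-- outer while loop of Source B over the sorted list s
def pvMergeLoop (s : List Int) (threshold : Int) : List Int :=
  match s with
  | [] => []
  | [x] => [x]
  | a :: b :: rest =>
    if a * b > threshold then a :: b :: rest
    else pvMergeLoop (pvInsertSorted (a * b) rest) threshold
termination_by s.length
decreasing_by
  have h : ∀ (p : Int) (l : List Int), (pvInsertSorted p l).length = l.length + 1 := by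
    intro p l; induction l with
    | nil => rfl
    | cons x xs ih => simp [pvInsertSorted]; split <;> simp [ih]
  simp [h]

def aggregate_factors_py_alt (factors : List Int) (threshold : Int) : List Int :=
  if factors.length <= 1 then factors
  else pvMergeLoop (PySem.List.sorted factors (fun x => x) false) threshold

-- ===== PRECONDITION & SPEC =====
def Spec_aggregate_factors_py (factors : List Int) (threshold : Int) (out : List Int) : Prop := out = aggregate_factors_py_alt factors threshold
instance (factors : List Int) (threshold : Int) (out : List Int) : Decidable (Spec_aggregate_factors_py factors threshold out) := by unfold Spec_aggregate_factors_py; infer_instance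

-- ===== CLAIM (what is proved, stated in full; the proofs are below) =====
def Claim_equal_aggregate_factors_py : Prop := ∀ (factors : List Int) (threshold : Int), Dom_aggregate_factors_py factors threshold → Spec_aggregate_factors_py factors threshold (aggregate_factors_py factors threshold)

-- ===== LEMMAS AND PROOFS =====

lemma pvInsertSorted_perm (p : Int) (l : List Int) : (pvInsertSorted p l).Perm (p :: l) := by
  induction l with
  | nil => simp [pvInsertSorted]
  | cons x xs ih =>
    simp only [pvInsertSorted]
    split
    · exact (ih.cons x).trans (List.Perm.swap p x xs)
    · exact List.Perm.refl _

lemma pvInsertSorted_pairwise (p : Int) (l : List Int)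
    (h : l.Pairwise (· ≤ ·)) : (pvInsertSorted p l).Pairwise (· ≤ ·) := by
  induction l with
  | nil => simp [pvInsertSorted]
  | cons x xs ih =>
    simp only [pvInsertSorted]
    rcases h with - | ⟨hx, hxs⟩
    split
    · rename_i hlt
      refine List.Pairwise.cons ?_ (ih hxs)
      intro y hy
      rcases List.mem_cons.mp ((pvInsertSorted_perm p xs).mem_iff.mp hy) with rfl | hy
      · exact le_of_lt hlt
      · exact hx y hy
    · rename_i hge
      refine List.Pairwise.cons ?_ (List.Pairwise.cons hx hxs)
      intro y hy
      rcases List.mem_cons.mp hy with rfl | hy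
      · omega
      · exact le_trans (by omega) (hx y hy)

lemma sorted_cons_eq_insert (p : Int) (rest : List Int)
    (h : rest.Pairwise (· ≤ ·)) :
    PySem.List.sorted (p :: rest) (fun x => x) false = pvInsertSorted p rest :=
  PySem.List.sorted_id_eq_of_perm_of_pairwise _ _ (pvInsertSorted_perm p rest)
    (pvInsertSorted_pairwise p rest h)

-- A on any list equals: unchanged if short, else the merge loop on the sorted list
lemma aggregate_eq_loop : ∀ (n : Nat) (l : List Int) (t : Int), l.length ≤ n →
    aggregate_factors_py l t =
      if l.length ≤ 1 then l
      else pvMergeLoop (PySem.List.sorted l (fun x => x) false) t := by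
  intro n
  induction n with
  | zero =>
    intro l t hl
    have : l = [] := List.eq_nil_of_length_eq_zero (by omega)
    subst this
    simp [aggregate_factors_py]
  | succ n ih =>
    intro l t hl
    by_cases h1 : l.length ≤ 1
    · rw [aggregate_factors_py]; simp [h1]
    · have hlen : (PySem.List.sorted l (fun x : Int => x) false).length = l.length :=
        PySem.List.length_sorted l _ _
      rcases hs : PySem.List.sorted l (fun x : Int => x) false with - | ⟨a, - | ⟨b, rest⟩⟩
      · rw [hs] at hlen; simp at hlen; omega
      · rw [hs] at hlen; simp at hlen; omega
      · have hpw : (a :: b :: rest).Pairwise (fun x y : Int => x ≤ y) := by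
          rw [← hs]; exact PySem.List.sorted_pairwise l _
        rw [aggregate_factors_py]
        simp only [if_neg h1]
        rw [hs, pvMergeLoop]
        by_cases hp : a * b > t
        · simp [hp]
        · simp only [hp, if_false]
          rw [hs] at hlen; simp at hlen
          have hrec := ih (a * b :: rest) t (by simp; omega)
          rw [hrec]
          rcases rest with - | ⟨c, rs⟩
          · simp [pvInsertSorted, pvMergeLoop]
          · have hrpw : (c :: rs).Pairwise (fun x y : Int => x ≤ y) :=
              (List.pairwise_cons.mp (List.pairwise_cons.mp hpw).2).2
            rw [if_neg (by simp), sorted_cons_eq_insert _ _ hrpw]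

-- ===== VERDICT (by name: the statement is the Claim_ definition above) =====
theorem aggregate_factors_py_spec : Claim_equal_aggregate_factors_py := by
  intro factors threshold _
  unfold Spec_aggregate_factors_py aggregate_factors_py_alt
  rw [aggregate_eq_loop factors.length factors threshold le_rfl]
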